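-- pv_equiv track=rewrite | github.com/dspalacios26/teoinf | PIA/src/diverse_matching.py | is_valid_matching
-- ===== SOURCE A (Python) =====
-- from typing import Dict, FrozenSet, Iterable, List, Optional, Sequence, Set, Tuple, Callable
--
-- Node = int
--
-- Edge = Tuple[Node, Node]
--
-- def is_valid_matching(edges: Set[Edge]) -> bool:
--     """
--     Verify that a set of edges forms a valid matching.
--     A valid matching has no two edges sharing a common vertex.
--
--     Args:
--         edges: Set of edges to verify
--
--     Returns:
--         True if edges form a valid matching, False otherwise
--     """
--     covered_nodes: Set[Node] = set()
--     for u, v in edges: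
--         if u in covered_nodes or v in covered_nodes:
--             return False
--         covered_nodes.add(u)
--         covered_nodes.add(v)
--     return True
-- ===== SOURCE B (Python) =====
-- def is_valid_matching(edges):
--     total = 0
--     union = set()
--     for u, v in edges:
--         total += len({u, v})
--         union |= {u, v}
--     return total == len(union)
-- ===== Notes on version B (the rewrite author's own statement) =====
-- stated objective: simpler
-- what changed: Replaces the early-exit per-edge membership test against an incrementally covered set by a single aggregate: sum of len({u,v}) over edges compared with the size of the union of all endpoints.
import Mathlib
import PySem

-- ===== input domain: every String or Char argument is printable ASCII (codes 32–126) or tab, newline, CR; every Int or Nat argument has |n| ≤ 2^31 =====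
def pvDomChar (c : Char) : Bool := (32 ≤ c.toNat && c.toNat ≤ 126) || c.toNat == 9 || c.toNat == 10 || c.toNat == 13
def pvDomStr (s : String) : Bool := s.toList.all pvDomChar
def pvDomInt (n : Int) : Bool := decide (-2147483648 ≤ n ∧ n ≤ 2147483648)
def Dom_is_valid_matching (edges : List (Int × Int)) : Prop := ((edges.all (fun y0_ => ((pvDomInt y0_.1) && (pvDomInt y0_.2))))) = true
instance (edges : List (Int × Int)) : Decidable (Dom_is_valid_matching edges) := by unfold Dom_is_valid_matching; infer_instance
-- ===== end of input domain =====

-- B replaces A's early-exit covered-set scan by one aggregate pass (sum of per-edge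
-- distinct-endpoint counts vs. size of the endpoint union); simpler, same cost.

-- ===== PORT A =====
def pvGoA : List (Int × Int) → PySem.Set Int → Bool
  | [], _ => true
  | (u, v) :: rest, cov =>
      if PySem.Set.contains cov u || PySem.Set.contains cov v then false
      else pvGoA rest (PySem.Set.add (PySem.Set.add cov u) v)

def is_valid_matching (edges : List (Int × Int)) : Bool :=
  pvGoA edges PySem.Set.empty

-- ===== PORT B =====
def pvStepB (acc : Nat × PySem.Set Int) (e : Int × Int) : Nat × PySem.Set Int :=
  (acc.1 + (PySem.Set.ofList [e.1, e.2]).length, PySem.Set.update acc.2 [e.1, e.2])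

def is_valid_matching_alt (edges : List (Int × Int)) : Bool :=
  let r := edges.foldl pvStepB (0, PySem.Set.empty)
  decide (r.1 = r.2.length)

-- ===== PRECONDITION & SPEC =====
def Spec_is_valid_matching (edges : List (Int × Int)) (out : Bool) : Prop := out = is_valid_matching_alt edges
instance (edges : List (Int × Int)) (out : Bool) : Decidable (Spec_is_valid_matching edges out) := by unfold Spec_is_valid_matching; infer_instance

-- ===== CLAIM (what is proved, stated in full; the proofs are below) =====
def Claim_equal_is_valid_matching : Prop := ∀ (edges : List (Int × Int)), Dom_is_valid_matching edges → Spec_is_valid_matching edges (is_valid_matching edges)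

-- ===== LEMMAS AND PROOFS =====

-- the union grows by at most the number of distinct endpoints added
theorem pvLenUpd (s : PySem.Set Int) (l : List Int) :
    (PySem.Set.update s l).length ≤ s.length + (PySem.Set.ofList l).length := by
  rw [PySem.Set.update_eq_append_filter, List.length_append]
  have := List.length_filter_le (fun y => !(PySem.Set.contains s y)) (PySem.Set.ofList l)
  omega

-- once the running total strictly exceeds the union size, it stays that way
theorem pvStrict (edges : List (Int × Int)) :
    ∀ (t : Nat) (s : PySem.Set Int), s.length < t →
      (edges.foldl pvStepB (t, s)).2.length < (edges.foldl pvStepB (t, s)).1 := by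
  induction edges with
  | nil => intro t s h; simpa using h
  | cons e rest ih =>
      intro t s h
      simp only [List.foldl_cons, pvStepB]
      exact ih _ _ (by have := pvLenUpd s [e.1, e.2]; omega)

-- main invariant: A's scan from a covered set cov equals B's aggregate comparison
-- started from (cov.length, cov)
theorem pvMain (edges : List (Int × Int)) :
    ∀ (cov : PySem.Set Int), cov.Nodup →
      pvGoA edges cov =
        decide ((edges.foldl pvStepB (cov.length, cov)).1 =
                (edges.foldl pvStepB (cov.length, cov)).2.length) := by
  induction edges with
  | nil => intro cov _; simp [pvGoA]
  | cons e rest ih =>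
      intro cov hn
      obtain ⟨u, v⟩ := e
      simp only [pvGoA, List.foldl_cons]
      by_cases hc : PySem.Set.contains cov u || PySem.Set.contains cov v
      · -- conflict: at least one endpoint already covered, the total pulls ahead for good
        simp only [hc, if_true, pvStepB]
        have hdrop : (PySem.Set.update cov [u, v]).length
            < cov.length + (PySem.Set.ofList [u, v]).length := by
          rw [PySem.Set.update_eq_append_filter, List.length_append]
          have hex : ∃ x ∈ PySem.Set.ofList [u, v],
              ¬ ((fun y => !(PySem.Set.contains cov y)) x = true) := by
            rcases Bool.or_eq_true_iff.mp hc with h | h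
            · exact ⟨u, (PySem.Set.mem_ofList [u, v] u).mpr (by simp), by simpa using (PySem.Set.contains_iff cov u).mp h⟩
            · exact ⟨v, (PySem.Set.mem_ofList [u, v] v).mpr (by simp), by simpa using (PySem.Set.contains_iff cov v).mp h⟩
          have := List.length_filter_lt_length_iff_exists.mpr hex
          omega
        have hstrict := pvStrict rest (cov.length + (PySem.Set.ofList [u, v]).length)
            (PySem.Set.update cov [u, v]) hdrop
        have hne : (rest.foldl pvStepB (cov.length + (PySem.Set.ofList [u, v]).length,
            PySem.Set.update cov [u, v])).1
            ≠ (rest.foldl pvStepB (cov.length + (PySem.Set.ofList [u, v]).length,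
            PySem.Set.update cov [u, v])).2.length := by omega
        exact (decide_eq_false hne).symm
      · -- no conflict: both endpoints fresh, total and union size grow alike; recurse
        simp only [hc, pvStepB]  -- condition is false here
        have hu : u ∉ cov := fun h =>
          hc (Bool.or_eq_true_iff.mpr (Or.inl ((PySem.Set.contains_iff cov u).mpr h)))
        have hv : v ∉ cov := fun h =>
          hc (Bool.or_eq_true_iff.mpr (Or.inr ((PySem.Set.contains_iff cov v).mpr h)))
        have hcov' : PySem.Set.add (PySem.Set.add cov u) v = PySem.Set.update cov [u, v] := rfl
        have hlen : (PySem.Set.update cov [u, v]).length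
            = cov.length + (PySem.Set.ofList [u, v]).length := by
          rw [PySem.Set.update_eq_append_filter, List.length_append]
          congr 1
          have hself : (PySem.Set.ofList [u, v]).filter (fun y => !(PySem.Set.contains cov y))
              = PySem.Set.ofList [u, v] := by
            apply List.filter_eq_self.mpr
            intro a ha
            have := (PySem.Set.mem_ofList [u, v] a).mp ha
            simp only [List.mem_cons, List.not_mem_nil, or_false] at this
            rcases this with rfl | rfl
            · simp [hu]
            · simp [hv]
          rw [hself]
        rw [hcov', ih (PySem.Set.update cov [u, v]) (PySem.Set.nodup_update cov [u, v] hn), hlen]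
        simp

-- ===== VERDICT (by name: the statement is the Claim_ definition above) =====
theorem is_valid_matching_spec : Claim_equal_is_valid_matching := by
  intro edges _
  unfold Spec_is_valid_matching is_valid_matching is_valid_matching_alt
  simpa using pvMain edges PySem.Set.empty (by simp [PySem.Set.empty])
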